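-- pv_equiv track=rewrite | github.com/IshaArora07/NuPlan-Probing | Stricter_classifier.py | stage1_from_tags_and_type
-- ===== SOURCE A (Python) =====
-- from typing import Optional, Any, Dict, List, Tuple
--
-- def _upper(x: Any) -> str:
--     return str(x).upper() if x is not None else ""
--
-- def stage1_from_tags_and_type(scenario_type: str, tags: List[str]) -> Tuple[Optional[int], Optional[str]]:
--     st = _upper(scenario_type)
--     tset = set(tags)
--
--     if "ROUNDABOUT" in st or any("ROUNDABOUT" in t for t in tset):
--         return 4, "stage1_tags"
--
--     if "UTURN" in st or "U_TURN" in st or any(("UTURN" in t or "U_TURN" in t) for t in tset):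
--         return 5, "stage1_tags"
--
--     # DIRECT right-turn (your requirement)
--     if (
--         ("STARTING_RIGHT" in st and "TURN" in st)
--         or ("RIGHT_TURN" in st)
--         or any(("STARTING_RIGHT" in t and "TURN" in t) for t in tset)
--         or any(("RIGHT" in t and "TURN" in t and "STARTING" in t) for t in tset)
--     ):
--         return 2, "stage1_tags"
--
--     return None, None
-- ===== SOURCE B (Python) =====
-- from typing import Optional, List, Tuple
--
-- _RESULTS = [(4, "stage1_tags"), (5, "stage1_tags"), (2, "stage1_tags"), (None, None)]
--
-- def _tag_rank(t: str) -> int: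
--     if "ROUNDABOUT" in t:
--         return 0
--     if "UTURN" in t or "U_TURN" in t:
--         return 1
--     if ("STARTING_RIGHT" in t and "TURN" in t) or ("RIGHT" in t and "TURN" in t and "STARTING" in t):
--         return 2
--     return 3
--
-- def _st_rank(s: str) -> int:
--     if "ROUNDABOUT" in s:
--         return 0
--     if "UTURN" in s or "U_TURN" in s:
--         return 1
--     if ("STARTING_RIGHT" in s and "TURN" in s) or "RIGHT_TURN" in s:
--         return 2
--     return 3
--
-- def stage1_from_tags_and_type(scenario_type: str, tags: List[str]) -> Tuple[Optional[int], Optional[str]]: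
--     st = str(scenario_type).upper() if scenario_type is not None else ""
--     best = _st_rank(st)
--     for t in set(tags):
--         best = min(best, _tag_rank(t))
--     return _RESULTS[best]
-- ===== Notes on version B (the rewrite author's own statement) =====
-- stated objective: alternative
-- what changed: B classifies each tag (and the scenario type) independently into a numeric priority rank, reduces by min over one pass, and indexes a result table with the best rank, instead of A's priority ladder of four separate any()-scans over the tag set.
import Mathlib
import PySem

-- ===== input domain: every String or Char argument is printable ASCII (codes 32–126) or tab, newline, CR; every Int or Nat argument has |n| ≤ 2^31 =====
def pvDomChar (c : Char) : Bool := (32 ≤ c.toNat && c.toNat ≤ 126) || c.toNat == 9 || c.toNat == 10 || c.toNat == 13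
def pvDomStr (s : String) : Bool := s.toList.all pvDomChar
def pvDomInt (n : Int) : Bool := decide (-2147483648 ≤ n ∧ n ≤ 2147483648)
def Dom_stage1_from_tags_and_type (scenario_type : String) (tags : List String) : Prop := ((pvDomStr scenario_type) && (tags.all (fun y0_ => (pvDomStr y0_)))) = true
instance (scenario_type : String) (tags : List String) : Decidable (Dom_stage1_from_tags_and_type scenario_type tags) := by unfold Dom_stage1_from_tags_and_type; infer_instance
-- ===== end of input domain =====

-- B replaces A's priority ladder of four any()-scans by classifying each tag to a numeric rank, reducing by min in one pass, and indexing a result table (alternative decomposition, same cost class).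

-- ===== PORT A =====
-- literal transliteration of A: _upper(scenario_type) is str.upper (the argument is a str), set(tags) = PySem.Set.ofList, each any(...) a scan over the set
def stage1_from_tags_and_type (scenario_type : String) (tags : List String) : Option Int × Option String :=
  let st := PySem.Str.upper scenario_type
  let tset := PySem.Set.ofList tags
  if PySem.Str.isIn "ROUNDABOUT" st || tset.any (fun t => PySem.Str.isIn "ROUNDABOUT" t) then
    (some 4, some "stage1_tags")
  else if PySem.Str.isIn "UTURN" st || PySem.Str.isIn "U_TURN" st
      || tset.any (fun t => PySem.Str.isIn "UTURN" t || PySem.Str.isIn "U_TURN" t) then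
    (some 5, some "stage1_tags")
  else if (PySem.Str.isIn "STARTING_RIGHT" st && PySem.Str.isIn "TURN" st)
      || PySem.Str.isIn "RIGHT_TURN" st
      || tset.any (fun t => PySem.Str.isIn "STARTING_RIGHT" t && PySem.Str.isIn "TURN" t)
      || tset.any (fun t => PySem.Str.isIn "RIGHT" t && PySem.Str.isIn "TURN" t && PySem.Str.isIn "STARTING" t) then
    (some 2, some "stage1_tags")
  else
    (none, none)

-- ===== PORT B =====
-- B-side helpers: per-tag rank, scenario-type rank, and the result table (Source B's _RESULTS list indexed by rank)
def pvTagRank (t : String) : Nat :=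
  if PySem.Str.isIn "ROUNDABOUT" t then 0
  else if PySem.Str.isIn "UTURN" t || PySem.Str.isIn "U_TURN" t then 1
  else if (PySem.Str.isIn "STARTING_RIGHT" t && PySem.Str.isIn "TURN" t)
       || (PySem.Str.isIn "RIGHT" t && PySem.Str.isIn "TURN" t && PySem.Str.isIn "STARTING" t) then 2
  else 3

def pvStRank (s : String) : Nat :=
  if PySem.Str.isIn "ROUNDABOUT" s then 0
  else if PySem.Str.isIn "UTURN" s || PySem.Str.isIn "U_TURN" s then 1
  else if (PySem.Str.isIn "STARTING_RIGHT" s && PySem.Str.isIn "TURN" s)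
       || PySem.Str.isIn "RIGHT_TURN" s then 2
  else 3

def pvRankOut (r : Nat) : Option Int × Option String :=
  match r with
  | 0 => (some 4, some "stage1_tags")
  | 1 => (some 5, some "stage1_tags")
  | 2 => (some 2, some "stage1_tags")
  | _ => (none, none)

-- literal transliteration of B: one min-fold over set(tags) starting from the scenario-type rank, then the table lookup
def stage1_from_tags_and_type_alt (scenario_type : String) (tags : List String) : Option Int × Option String :=
  let st := PySem.Str.upper scenario_type
  pvRankOut ((PySem.Set.ofList tags).foldl (fun best t => min best (pvTagRank t)) (pvStRank st))

-- ===== PRECONDITION & SPEC =====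
def Spec_stage1_from_tags_and_type (scenario_type : String) (tags : List String) (out : Option Int × Option String) : Prop := out = stage1_from_tags_and_type_alt scenario_type tags
instance (scenario_type : String) (tags : List String) (out : Option Int × Option String) : Decidable (Spec_stage1_from_tags_and_type scenario_type tags out) := by unfold Spec_stage1_from_tags_and_type; infer_instance

-- ===== CLAIM (what is proved, stated in full; the proofs are below) =====
def Claim_equal_stage1_from_tags_and_type : Prop := ∀ (scenario_type : String) (tags : List String), Dom_stage1_from_tags_and_type scenario_type tags → Spec_stage1_from_tags_and_type scenario_type tags (stage1_from_tags_and_type scenario_type tags)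

-- ===== LEMMAS AND PROOFS =====

-- the rank ladder distributes over cons: abstract boolean fact
theorem ladder_cons (a0 a1 a2 A0 A1 A2 : Bool) :
    (if (a0 || A0) = true then 0 else if (a1 || A1) = true then 1 else if (a2 || A2) = true then 2 else 3)
      = min (if a0 = true then 0 else if a1 = true then 1 else if a2 = true then 2 else 3)
            (if A0 = true then 0 else if A1 = true then 1 else if A2 = true then 2 else 3) := by
  revert a0 a1 a2 A0 A1 A2; decide

-- B's min-fold of per-tag ranks computes the ladder of the three any-scans
theorem foldl_min_tagRank (l : List String) (b : Nat) (hb : b ≤ 3) :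
    l.foldl (fun best t => min best (pvTagRank t)) b
      = min b (if l.any (fun t => PySem.Str.isIn "ROUNDABOUT" t) then 0
          else if l.any (fun t => PySem.Str.isIn "UTURN" t || PySem.Str.isIn "U_TURN" t) then 1
          else if l.any (fun t => (PySem.Str.isIn "STARTING_RIGHT" t && PySem.Str.isIn "TURN" t)
                || (PySem.Str.isIn "RIGHT" t && PySem.Str.isIn "TURN" t && PySem.Str.isIn "STARTING" t)) then 2
          else 3) := by
  induction l generalizing b with
  | nil => simp; omega
  | cons x xs ih =>
    rw [List.foldl_cons, ih (min b (pvTagRank x)) (le_trans (min_le_left _ _) hb)]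
    rw [List.any_cons, List.any_cons, List.any_cons, ladder_cons, min_assoc]
    rfl

theorem any_or_split (p q : String → Bool) (l : List String) :
    l.any (fun t => p t || q t) = (l.any p || l.any q) := by
  induction l with
  | nil => simp
  | cons x xs ih => cases p x <;> cases q x <;> simp [ih, Bool.or_assoc, Bool.or_left_comm]

-- A's if-ladder equals the table lookup of the min of the two ranks: abstract boolean fact
theorem out_ladder (s0 su1 su2 s2a s2b A0 A1 A2a A2b : Bool) :
    (if (s0 || A0) = true then ((some 4 : Option Int), (some "stage1_tags" : Option String))
     else if (su1 || su2 || A1) = true then (some 5, some "stage1_tags")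
     else if (s2a || s2b || A2a || A2b) = true then (some 2, some "stage1_tags")
     else (none, none))
      = pvRankOut (min
          (if s0 = true then 0 else if (su1 || su2) = true then 1 else if (s2a || s2b) = true then 2 else 3)
          (if A0 = true then 0 else if A1 = true then 1 else if (A2a || A2b) = true then 2 else 3)) := by
  revert s0 su1 su2 s2a s2b A0 A1 A2a A2b; decide

theorem pvStRank_le (s : String) : pvStRank s ≤ 3 := by
  unfold pvStRank; split_ifs <;> omega

-- ===== VERDICT (by name: the statement is the Claim_ definition above) =====
theorem stage1_from_tags_and_type_spec : Claim_equal_stage1_from_tags_and_type := by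
  intro scenario_type tags _
  show stage1_from_tags_and_type scenario_type tags = stage1_from_tags_and_type_alt scenario_type tags
  simp only [stage1_from_tags_and_type, stage1_from_tags_and_type_alt]
  rw [foldl_min_tagRank _ _ (pvStRank_le _), any_or_split
        (fun t => PySem.Str.isIn "STARTING_RIGHT" t && PySem.Str.isIn "TURN" t)
        (fun t => PySem.Str.isIn "RIGHT" t && PySem.Str.isIn "TURN" t && PySem.Str.isIn "STARTING" t)]
  rw [out_ladder]
  rfl
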